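-- pv_equiv track=rewrite | github.com/jordanpolun/English-Python | Subwords/subwords.py | make_subwords
-- ===== SOURCE A (Python) =====
-- def make_subwords(word):
--     word_1 = ""
--     word_2 = ""
--     for index in range(0, len(word)):
--         if index % 2 == 0:
--             word_1 += word[index]
--         else:
--             word_2 += word[index]
--
--     return (word_1, word_2)
-- ===== SOURCE B (Python) =====
-- def make_subwords(word):
--     return (word[::2], word[1::2])
-- ===== Notes on version B (the rewrite author's own statement) =====
-- stated objective: idiomatic
-- what changed: Replaces the indexed loop with a parity branch and two string accumulators by two extended slices, word[::2] and word[1::2].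
import Mathlib
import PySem

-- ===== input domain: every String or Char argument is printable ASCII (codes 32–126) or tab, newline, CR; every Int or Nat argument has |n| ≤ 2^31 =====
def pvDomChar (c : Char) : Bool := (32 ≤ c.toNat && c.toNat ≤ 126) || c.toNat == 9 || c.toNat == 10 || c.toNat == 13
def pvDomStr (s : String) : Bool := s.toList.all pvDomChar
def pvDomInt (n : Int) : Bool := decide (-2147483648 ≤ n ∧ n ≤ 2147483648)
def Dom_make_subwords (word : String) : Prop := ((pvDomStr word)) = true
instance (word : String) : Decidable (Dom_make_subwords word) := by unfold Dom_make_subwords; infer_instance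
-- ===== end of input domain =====

-- B replaces A's indexed loop (parity branch, two string accumulators) by the two
-- extended slices word[::2] and word[1::2]; objective: idiomatic.

-- ===== PORT A =====
-- the loop body: `if index % 2 == 0: word_1 += word[index] else: word_2 += word[index]`
-- (the `none` branch of pyGet? is unreachable: index ranges over range(0, len(word)))
def pvStepA (word : String) (st : String × String) (index : Int) : String × String :=
  match PySem.Str.pyGet? word index with
  | some c => if index % 2 = 0 then (st.1.push c, st.2) else (st.1, st.2.push c)
  | none => st

def make_subwords (word : String) : String × String :=
  (PySem.List.pyRange 0 (PySem.Str.len word)).foldl (pvStepA word) ("", "")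

-- ===== PORT B =====
-- B is `return (word[::2], word[1::2])`; a slice with step 2 never fails (`some`), so getD's
-- default is never used.
def make_subwords_alt (word : String) : String × String :=
  ((PySem.Str.slice? word none none 2).getD "", (PySem.Str.slice? word (some 1) none 2).getD "")

-- ===== PRECONDITION & SPEC =====
def Spec_make_subwords (word : String) (out : String × String) : Prop := out = make_subwords_alt word
instance (word : String) (out : String × String) : Decidable (Spec_make_subwords word out) := by unfold Spec_make_subwords; infer_instance

-- ===== CLAIM (what is proved, stated in full; the proofs are below) =====
def Claim_equal_make_subwords : Prop := ∀ (word : String), Dom_make_subwords word → Spec_make_subwords word (make_subwords word)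

-- ===== LEMMAS AND PROOFS =====

-- the characters of xs at even indices (0, 2, 4, …)
def pvEvens : List Char → List Char
  | [] => []
  | [c] => [c]
  | c :: _ :: rest => c :: pvEvens rest

lemma pvEvens_cons (c : Char) (xs : List Char) :
    pvEvens (c :: xs) = c :: pvEvens xs.tail := by
  cases xs <;> rfl

lemma push_append_ofList (s : String) (c : Char) (l : List Char) :
    s.push c ++ String.ofList l = s ++ String.ofList (c :: l) := by
  rw [← String.toList_inj]
  simp

lemma filterMap_evens (xs : List Char) :
    List.filterMap (fun k : ℕ => xs[2*k]?) (List.range ((xs.length + 1) / 2)) = pvEvens xs := by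
  induction xs using pvEvens.induct with
  | case1 => simp [pvEvens]
  | case2 c => simp [pvEvens]
  | case3 c d rest ih =>
      have hlen : ((c :: d :: rest).length + 1) / 2 = (rest.length + 1) / 2 + 1 := by
        simp only [List.length_cons]; omega
      rw [hlen, List.range_succ_eq_map, List.filterMap_cons, List.filterMap_map]
      have h0 : (c :: d :: rest)[2*0]? = some c := rfl
      rw [h0]
      have hcong : List.filterMap ((fun k : ℕ => (c :: d :: rest)[2*k]?) ∘ (· + 1)) (List.range ((rest.length + 1) / 2))
          = List.filterMap (fun k : ℕ => rest[2*k]?) (List.range ((rest.length + 1) / 2)) := by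
        apply List.filterMap_congr
        intro k _
        have h2 : 2 * (k + 1) = (2 * k) + 1 + 1 := by ring
        simp [Function.comp, h2]
      rw [hcong, ih]
      rfl

lemma slice?_two (xs : List Char) :
    PySem.List.slice? xs none none 2 = some (pvEvens xs) := by
  simp only [PySem.List.slice?, PySem.List.sliceIndices]
  norm_num
  have hcount : (if 0 < xs.length then (((xs.length:ℤ) + 2 - 1) / 2).toNat else 0)
      = (xs.length + 1) / 2 := by split_ifs <;> omega
  rw [hcount]
  have hcong : List.filterMap (fun k : ℕ => xs[((2:ℤ) * (k:ℤ)).toNat]?) (List.range ((xs.length + 1) / 2))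
      = List.filterMap (fun k : ℕ => xs[2*k]?) (List.range ((xs.length + 1) / 2)) := by
    apply List.filterMap_congr
    intro k _
    have h2 : ((2:ℤ) * (k:ℤ)).toNat = 2 * k := by omega
    rw [h2]
  rw [hcong, filterMap_evens]

lemma slice?_two_one (xs : List Char) :
    PySem.List.slice? xs (some 1) none 2 = some (pvEvens xs.tail) := by
  cases xs with
  | nil => rfl
  | cons c rest =>
      simp only [PySem.List.slice?, PySem.List.sliceIndices]
      norm_num
      have hcount : (if 0 < rest.length then (((rest.length:ℤ) + 2 - 1) / 2).toNat else 0)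
          = (rest.length + 1) / 2 := by split_ifs <;> omega
      rw [hcount]
      have hcong : List.filterMap (fun k : ℕ => (c :: rest)[((1:ℤ) + 2 * (k:ℤ)).toNat]?) (List.range ((rest.length + 1) / 2))
          = List.filterMap (fun k : ℕ => rest[2*k]?) (List.range ((rest.length + 1) / 2)) := by
        apply List.filterMap_congr
        intro k _
        have h1 : ((1:ℤ) + 2 * (k:ℤ)).toNat = 2 * k + 1 := by omega
        rw [h1, List.getElem?_cons_succ]
      rw [hcong, filterMap_evens]

lemma loopA (word : String) : ∀ (cs : List Char) (a : ℕ) (u v : String),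
    word.toList.drop a = cs →
    (PySem.List.pyRange (a:ℤ) (word.toList.length:ℤ)).foldl (pvStepA word) (u, v) =
      if a % 2 = 0 then
        (u ++ String.ofList (pvEvens cs), v ++ String.ofList (pvEvens cs.tail))
      else
        (u ++ String.ofList (pvEvens cs.tail), v ++ String.ofList (pvEvens cs)) := by
  intro cs
  induction cs with
  | nil =>
      intro a u v h
      have hle : word.toList.length ≤ a := by
        by_contra hlt
        have := List.drop_eq_nil_iff.mp h
        omega
      have hr : PySem.List.pyRange (a:ℤ) (word.toList.length:ℤ) = [] := by
        have h2 : word.length ≤ a := by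
          have h3 : word.toList.length = word.length := by simp
          omega
        simp only [PySem.List.pyRange]
        norm_num
        omega
      rw [hr]
      have he : String.ofList ([] : List Char) = "" := rfl
      split_ifs <;> simp [pvEvens, he]
  | cons c cs' ih =>
      intro a u v h
      have ha : a < word.toList.length := by
        by_contra hge
        rw [List.drop_eq_nil_iff.mpr (by omega)] at h
        simp at h
      have hget : word.toList[a]? = some c := by
        have h0 : (word.toList.drop a)[0]? = some c := by rw [h]; rfl
        rw [List.getElem?_drop] at h0
        simpa using h0
      have htail : word.toList.drop (a + 1) = cs' := by
        have := congrArg List.tail h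
        rwa [List.tail_drop] at this
      rw [PySem.List.pyRange_one_cons (by exact_mod_cast ha), List.foldl_cons]
      have hstep : ∀ st : String × String, pvStepA word st (a:ℤ) =
          if (a:ℤ) % 2 = 0 then (st.1.push c, st.2) else (st.1, st.2.push c) := by
        intro st
        simp [pvStepA, hget]
      by_cases hpar : a % 2 = 0
      · rw [hstep, if_pos (by omega), if_pos hpar]
        have := ih (a + 1) (u.push c) v htail
        rw [if_neg (by omega)] at this
        push_cast at this ⊢
        rw [this, push_append_ofList, pvEvens_cons]
        simp
      · rw [hstep, if_neg (by omega), if_neg hpar]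
        have := ih (a + 1) u (v.push c) htail
        rw [if_pos (by omega)] at this
        push_cast at this ⊢
        rw [this, push_append_ofList, pvEvens_cons]
        simp

-- ===== VERDICT (by name: the statement is the Claim_ definition above) =====
theorem make_subwords_spec : Claim_equal_make_subwords := by
  intro word _
  unfold Spec_make_subwords make_subwords make_subwords_alt
  have hB1 : PySem.Str.slice? word none none 2 = some (String.ofList (pvEvens word.toList)) := by
    simp [PySem.Str.slice?, slice?_two]
  have hB2 : PySem.Str.slice? word (some 1) none 2 = some (String.ofList (pvEvens word.toList.tail)) := by
    simp [PySem.Str.slice?, slice?_two_one]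
  rw [hB1, hB2]
  have hA := loopA word word.toList 0 "" "" (by simp)
  rw [if_pos (by omega)] at hA
  have hlen : PySem.Str.len word = (word.toList.length : ℤ) := rfl
  rw [hlen]
  have h0 : ((0:ℕ):ℤ) = (0:ℤ) := rfl
  rw [← h0, hA]
  simp
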